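-- pv_equiv track=rewrite | github.com/Night1918-repos-mirror/ZJU-course | 软件质量保证与测试/homework3/实验代码/main.py | calc_covered_ucp_num_for_next_value
-- ===== SOURCE A (Python) =====
-- def calc_covered_ucp_num_for_next_value(selected_params, selected_params_num, wise_num, f, vi, uncovered_pairs):
--     elem_num = len(selected_params)
--     subset_num = 2 ** elem_num
--     total_cover_ucp_num = 0
--     for i in range(subset_num):
--         subset = []
--         subset_len = 0
--         for j in range(elem_num):
--             if ((i >> j) % 2):
--                 subset.append(selected_params[j])
--                 subset_len += 1
--             else:
--                 subset.append(-1)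
--         if subset_len == wise_num - 1:
--             subset[f] = vi
--             if tuple(subset) in uncovered_pairs:
--                 total_cover_ucp_num += 1
--     return total_cover_ucp_num
-- ===== SOURCE B (Python) =====
-- def _combos(n, k):
--     # all k-element increasing position lists chosen from range(n)
--     if k == 0:
--         return [[]]
--     if k > n:
--         return []
--     return _combos(n - 1, k) + [c + [n - 1] for c in _combos(n - 1, k - 1)]
--
-- def calc_covered_ucp_num_for_next_value(selected_params, selected_params_num, wise_num, f, vi, uncovered_pairs):
--     n = len(selected_params)
--     k = wise_num - 1
--     if k < 0 or k > n:
--         return 0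
--     total = 0
--     for positions in _combos(n, k):
--         subset = [-1] * n
--         for j in positions:
--             subset[j] = selected_params[j]
--         subset[f] = vi
--         if tuple(subset) in uncovered_pairs:
--             total += 1
--     return total
-- ===== Notes on version B (the rewrite author's own statement) =====
-- stated objective: alternative
-- what changed: Instead of enumerating all 2^n bitmask subsets and keeping those of popcount wise_num-1, B recursively generates exactly the (wise_num-1)-element position combinations, builds each candidate by overwriting a [-1]*n template, and returns 0 immediately when wise_num-1 is outside [0,n].
import Mathlib
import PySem

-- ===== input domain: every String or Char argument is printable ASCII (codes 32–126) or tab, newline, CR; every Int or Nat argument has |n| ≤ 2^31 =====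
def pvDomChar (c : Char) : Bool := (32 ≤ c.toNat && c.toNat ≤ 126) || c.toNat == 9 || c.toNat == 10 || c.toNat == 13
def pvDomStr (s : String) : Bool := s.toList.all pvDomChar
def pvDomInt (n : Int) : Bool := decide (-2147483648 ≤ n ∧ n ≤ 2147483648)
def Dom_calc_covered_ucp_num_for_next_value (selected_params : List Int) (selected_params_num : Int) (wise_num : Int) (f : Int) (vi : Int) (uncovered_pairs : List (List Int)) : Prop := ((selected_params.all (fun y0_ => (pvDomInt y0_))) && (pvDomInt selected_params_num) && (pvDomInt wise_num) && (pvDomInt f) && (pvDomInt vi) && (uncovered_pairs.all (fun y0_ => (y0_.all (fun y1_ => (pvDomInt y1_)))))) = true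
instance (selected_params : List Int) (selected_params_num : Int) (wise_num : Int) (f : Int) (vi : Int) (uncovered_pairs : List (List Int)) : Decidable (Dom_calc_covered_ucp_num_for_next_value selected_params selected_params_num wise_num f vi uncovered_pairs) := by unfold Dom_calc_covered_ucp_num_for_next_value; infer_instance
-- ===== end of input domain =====

-- B replaces A's scan of all 2^n bitmask subsets (filtered by popcount) with a recursive
-- enumeration of only the (wise_num-1)-element position combinations.

-- ===== PORT A =====
-- Literal port of A: for i in range(2 ** len(selected_params)) build 'subset' and 'subset_len'
-- bit by bit; 'subset[f] = vi' is pySetD (its IndexError input is excluded by Pre_);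
-- 'tuple(subset) in uncovered_pairs' is membership (uncovered_pairs is a set of tuples,
-- and a tuple compares elementwise).
def calc_covered_ucp_num_for_next_value (selected_params : List Int) (selected_params_num : Int) (wise_num : Int) (f : Int) (vi : Int) (uncovered_pairs : List (List Int)) : Int :=
  let elem_num : Int := selected_params.length
  let subset_num : Int := 2 ^ elem_num.toNat    -- 2 ** elem_num (elem_num = len ≥ 0, so exact)
  (PySem.List.pyRange 0 subset_num 1).foldl (fun total_cover_ucp_num i =>
    let p :=
      (PySem.List.pyRange 0 elem_num 1).foldl
        (fun (st : List Int × Int) j =>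
          if PySem.Int.mod (i >>> (j.toNat : Int)) 2 ≠ 0 then    -- (i >> j) % 2 truthy; j ≥ 0
            (st.1 ++ [PySem.List.pyGetD selected_params j 0], st.2 + 1)
          else
            (st.1 ++ [(-1 : Int)], st.2))
        (([] : List Int), (0 : Int))
    if p.2 = wise_num - 1 then
      let subset := PySem.List.pySetD p.1 f vi               -- subset[f] = vi
      if subset ∈ uncovered_pairs then total_cover_ucp_num + 1 else total_cover_ucp_num
    else total_cover_ucp_num) 0

-- ===== PORT B =====
-- _combos(n, k): all k-element increasing position lists chosen from range(n)
def pvCombos (n k : Nat) : List (List Nat) :=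
  if _h1 : k = 0 then [[]]
  else if _h2 : n < k then []
  else pvCombos (n-1) k ++ (pvCombos (n-1) (k-1)).map (fun c => c ++ [n-1])
termination_by n
decreasing_by all_goals omega

def calc_covered_ucp_num_for_next_value_alt (selected_params : List Int) (selected_params_num : Int) (wise_num : Int) (f : Int) (vi : Int) (uncovered_pairs : List (List Int)) : Int :=
  let n := selected_params.length
  let k : Int := wise_num - 1
  if k < 0 ∨ (n : Int) < k then 0
  else
    (pvCombos n k.toNat).foldl (fun total positions =>
      let subset := positions.foldl
          (fun st (j : Nat) => PySem.List.pySetD st (j : Int) (PySem.List.pyGetD selected_params (j : Int) 0))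
          (List.replicate n (-1 : Int))                      -- [-1] * n, then subset[j] = selected_params[j]
      let subset' := PySem.List.pySetD subset f vi           -- subset[f] = vi
      if subset' ∈ uncovered_pairs then total + 1 else total) 0

-- ===== PRECONDITION & SPEC =====
-- A (and B) raise IndexError at 'subset[f] = vi' exactly when a candidate subset exists
-- (0 ≤ wise_num-1 ≤ len(selected_params)) while f is out of Python index range; Pre_ excludes exactly that.
def Pre_calc_covered_ucp_num_for_next_value (selected_params : List Int) (selected_params_num : Int) (wise_num : Int) (f : Int) (vi : Int) (uncovered_pairs : List (List Int)) : Prop :=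
  (0 ≤ wise_num - 1 ∧ wise_num - 1 ≤ (selected_params.length : Int)) → PySem.Raise.InRange selected_params.length f
instance (selected_params : List Int) (selected_params_num : Int) (wise_num : Int) (f : Int) (vi : Int) (uncovered_pairs : List (List Int)) : Decidable (Pre_calc_covered_ucp_num_for_next_value selected_params selected_params_num wise_num f vi uncovered_pairs) := by unfold Pre_calc_covered_ucp_num_for_next_value; infer_instance

def pvWitness_calc_covered_ucp_num_for_next_value : List Int × Int × Int × Int × Int × List (List Int) :=
  ([3], 1, 2, 0, 7, [[7]])

def Spec_calc_covered_ucp_num_for_next_value (selected_params : List Int) (selected_params_num : Int) (wise_num : Int) (f : Int) (vi : Int) (uncovered_pairs : List (List Int)) (out : Int) : Prop := out = calc_covered_ucp_num_for_next_value_alt selected_params selected_params_num wise_num f vi uncovered_pairs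
instance (selected_params : List Int) (selected_params_num : Int) (wise_num : Int) (f : Int) (vi : Int) (uncovered_pairs : List (List Int)) (out : Int) : Decidable (Spec_calc_covered_ucp_num_for_next_value selected_params selected_params_num wise_num f vi uncovered_pairs out) := by unfold Spec_calc_covered_ucp_num_for_next_value; infer_instance

-- ===== CLAIM (what is proved, stated in full; the proofs are below) =====
def Claim_equal_calc_covered_ucp_num_for_next_value : Prop := ∀ (selected_params : List Int) (selected_params_num : Int) (wise_num : Int) (f : Int) (vi : Int) (uncovered_pairs : List (List Int)), Dom_calc_covered_ucp_num_for_next_value selected_params selected_params_num wise_num f vi uncovered_pairs → Pre_calc_covered_ucp_num_for_next_value selected_params selected_params_num wise_num f vi uncovered_pairs → Spec_calc_covered_ucp_num_for_next_value selected_params selected_params_num wise_num f vi uncovered_pairs (calc_covered_ucp_num_for_next_value selected_params selected_params_num wise_num f vi uncovered_pairs)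

-- ===== LEMMAS AND PROOFS =====

-- the candidate list both programs build for a chosen set of positions (g = its membership function)
def pvBuild (sp : List Int) (n : Nat) (g : Nat → Bool) : List Int :=
  (List.range n).map (fun j => if g j then PySem.List.pyGetD sp (j : Int) 0 else -1)

-- the test both programs apply to a candidate: overwrite index f with vi, then membership
def pvQ (sp : List Int) (n : Nat) (f vi : Int) (up : List (List Int)) (g : Nat → Bool) : Bool :=
  decide (PySem.List.pySetD (pvBuild sp n g) f vi ∈ up)

-- popcount of m restricted to bits below n
def pvPcb (m n : Nat) : Nat := (List.range n).countP (fun j => m.testBit j)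

lemma pvCombos_zero (n : Nat) : pvCombos n 0 = [[]] := by
  rw [pvCombos]
  simp

lemma pvCombos_nil {n k : Nat} (h : n < k) : pvCombos n k = [] := by
  rw [pvCombos]
  have hk : ¬ k = 0 := by omega
  simp [hk, h]

lemma pvCombos_succ (n k : Nat) :
    pvCombos (n+1) (k+1) = pvCombos n (k+1) ++ (pvCombos n k).map (fun c => c ++ [n]) := by
  by_cases h : n + 1 < k + 1
  · rw [pvCombos_nil h, pvCombos_nil (show n < k + 1 by omega), pvCombos_nil (show n < k by omega)]
    simp
  · rw [pvCombos]
    simp [h]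

lemma pvCombos_mem_lt : ∀ n k S, S ∈ pvCombos n k → ∀ j ∈ S, j < n := by
  intro n
  induction n with
  | zero =>
    intro k S hS j hj
    cases k with
    | zero =>
      rw [pvCombos_zero] at hS
      simp at hS
      subst hS
      simp at hj
    | succ k =>
      rw [pvCombos_nil (by omega)] at hS
      simp at hS
  | succ n ih =>
    intro k S hS j hj
    cases k with
    | zero =>
      rw [pvCombos_zero] at hS
      simp at hS
      subst hS
      simp at hj
    | succ k =>
      rw [pvCombos_succ] at hS
      rcases List.mem_append.1 hS with h1 | h2
      · exact Nat.lt_succ_of_lt (ih _ _ h1 j hj)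
      · rcases List.mem_map.1 h2 with ⟨c, hc, rfl⟩
        rcases List.mem_append.1 hj with hj1 | hj2
        · exact Nat.lt_succ_of_lt (ih _ _ hc j hj1)
        · simp at hj2
          omega

lemma pv_testBit_high {m n j : Nat} (h : m < 2^n) (hj : n ≤ j) : m.testBit j = false :=
  Nat.testBit_lt_two_pow (lt_of_lt_of_le h (Nat.pow_le_pow_right (by omega) hj))

lemma pv_testBit_add_ne {m n j : Nat} (h : m < 2^n) (hj : j ≠ n) :
    (2^n + m).testBit j = m.testBit j := by
  rcases Nat.lt_or_ge j n with hl | hg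
  · simpa using Nat.testBit_two_pow_add_gt (by omega) m
  · have hlt : 2^n + m < 2^(n+1) := by
      have h2 : (2:Nat)^(n+1) = 2^n * 2 := by ring
      omega
    rw [pv_testBit_high h (by omega), pv_testBit_high hlt (by omega)]

lemma pvPcb_succ (m n : Nat) :
    pvPcb m (n+1) = pvPcb m n + (if m.testBit n then 1 else 0) := by
  unfold pvPcb
  rw [List.range_succ, List.countP_append]
  simp [List.countP_cons]

lemma pvPcb_le (m n : Nat) : pvPcb m n ≤ n := by
  calc pvPcb m n ≤ (List.range n).length := List.countP_le_length
  _ = n := by simp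

lemma pv_testBit_iff (m n : Nat) : m.testBit n = true ↔ (m >>> n) % 2 ≠ 0 := by
  simp [Nat.testBit, Nat.and_one_is_mod, Nat.and_comm]

-- the central count identity: masks with popcount k ↔ k-element combinations of positions
lemma pvCount (n : Nat) : ∀ (k : Nat) (F : (Nat → Bool) → Bool),
    ((List.range (2^n)).countP (fun m => (pvPcb m n == k) && F m.testBit))
    = (pvCombos n k).countP (fun S => F (fun j => decide (j ∈ S))) := by
  induction n with
  | zero =>
    intro k F
    have hf : (Nat.testBit 0) = (fun j => decide (j ∈ ([] : List Nat))) := by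
      funext j
      simp
    cases k with
    | zero =>
      rw [pow_zero, List.range_one, pvCombos_zero]
      simp [pvPcb, hf]
    | succ k =>
      rw [pow_zero, List.range_one, pvCombos_nil (by omega)]
      simp [pvPcb]
  | succ n ih =>
    intro k F
    have hsplit : List.range (2^(n+1)) = List.range (2^n) ++ (List.range (2^n)).map (fun m => 2^n + m) := by
      have h2 : (2:Nat)^(n+1) = 2^n + 2^n := by ring
      rw [h2, List.range_add]
    rw [hsplit, List.countP_append, List.countP_map]
    have h1 : (List.range (2^n)).countP (fun m => (pvPcb m (n+1) == k) && F m.testBit)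
            = (List.range (2^n)).countP (fun m => (pvPcb m n == k) && F m.testBit) := by
      apply List.countP_congr
      intro m hm
      have hmlt : m < 2^n := List.mem_range.1 hm
      rw [pvPcb_succ, Nat.testBit_lt_two_pow hmlt]
      simp
    have hbit : ∀ m, m < 2^n →
        Nat.testBit (2^n + m) = (fun j => m.testBit j || decide (j = n)) := by
      intro m hmlt
      funext j
      by_cases hj : j = n
      · subst hj
        simp [Nat.testBit_two_pow_add_eq, Nat.testBit_lt_two_pow hmlt]
      · rw [pv_testBit_add_ne hmlt hj]
        simp [hj]
    have hpcb : ∀ m, m < 2^n → pvPcb (2^n + m) (n+1) = pvPcb m n + 1 := by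
      intro m hmlt
      have hsame : pvPcb (2^n + m) n = pvPcb m n := by
        unfold pvPcb
        apply List.countP_congr
        intro j hj
        have hjn : j < n := List.mem_range.1 hj
        rw [pv_testBit_add_ne hmlt (by omega)]
      have ht : Nat.testBit (2^n + m) n = true := by
        rw [hbit m hmlt]
        simp
      rw [pvPcb_succ, ht, hsame]
      simp
    cases k with
    | zero =>
      have h2 : List.countP ((fun m => (pvPcb m (n+1) == 0) && F m.testBit) ∘ (fun m => 2^n + m))
          (List.range (2^n)) = 0 := by
        apply List.countP_eq_zero.2
        intro m hm
        have hmlt : m < 2^n := List.mem_range.1 hm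
        simp only [Function.comp_apply]
        rw [hpcb m hmlt]
        simp
      rw [h1, ih 0 F, h2, pvCombos_zero, pvCombos_zero]
      simp
    | succ k =>
      have h2 : List.countP ((fun m => (pvPcb m (n+1) == k+1) && F m.testBit) ∘ (fun m => 2^n + m))
          (List.range (2^n))
          = List.countP (fun m => (pvPcb m n == k) && (fun g => F (fun j => g j || decide (j = n))) m.testBit)
          (List.range (2^n)) := by
        apply List.countP_congr
        intro m hm
        have hmlt : m < 2^n := List.mem_range.1 hm
        simp only [Function.comp_apply]
        rw [hpcb m hmlt, hbit m hmlt]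
        have hbq : ((pvPcb m n + 1 == k + 1)) = ((pvPcb m n == k)) := by
          by_cases h : pvPcb m n = k
          · simp [h]
          · have hA : (pvPcb m n + 1 == k + 1) = false := by
              cases hb : (pvPcb m n + 1 == k + 1)
              · rfl
              · exfalso
                have := eq_of_beq hb
                omega
            have hB : (pvPcb m n == k) = false := by
              cases hb : (pvPcb m n == k)
              · rfl
              · exact absurd (eq_of_beq hb) h
            rw [hA, hB]
        rw [hbq]
      have h3 : List.countP (fun S => (fun g => F (fun j => g j || decide (j = n))) (fun j => decide (j ∈ S)))
            (pvCombos n k)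
          = List.countP ((fun S => F (fun j => decide (j ∈ S))) ∘ (fun c => c ++ [n])) (pvCombos n k) := by
        apply List.countP_congr
        intro S hS
        simp only [Function.comp_apply]
        have hff : (fun j => decide (j ∈ S) || decide (j = n)) = (fun j => decide (j ∈ S ++ [n])) := by
          funext j
          simp [List.mem_append]
        rw [hff]
      rw [h1, ih (k+1) F, h2, ih k (fun g => F (fun j => g j || decide (j = n))), h3,
          pvCombos_succ, List.countP_append, List.countP_map]

-- ===== A-side reduction =====

lemma pvInnerA (sp : List Int) (m : Nat) (n : Nat) :
    (PySem.List.pyRange 0 (n : Int) 1).foldl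
      (fun (st : List Int × Int) j =>
        if PySem.Int.mod ((m : Int) >>> (j.toNat : Int)) 2 ≠ 0 then
          (st.1 ++ [PySem.List.pyGetD sp j 0], st.2 + 1)
        else
          (st.1 ++ [(-1 : Int)], st.2))
      (([] : List Int), (0 : Int))
    = (pvBuild sp n m.testBit, (pvPcb m n : Int)) := by
  rw [PySem.List.pyRange_zero_nat, List.foldl_map]
  induction n with
  | zero =>
    simp [pvBuild, pvPcb]
  | succ n ih =>
    rw [List.range_succ, List.foldl_append, ih]
    simp only [List.foldl_cons, List.foldl_nil]
    have hcond : (PySem.Int.mod ((m : Int) >>> ((((n : Int)).toNat : Nat) : Int)) 2 ≠ 0) ↔ m.testBit n = true := by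
      rw [Int.toNat_natCast]
      have h1 : ((m : Int) >>> ((n : Nat) : Int)) = ((m >>> n : Nat) : Int) := by simp
      rw [h1, PySem.Int.mod_eq_emod_of_pos (by omega)]
      have h2 : ((m >>> n : Nat) : Int) % 2 = (((m >>> n) % 2 : Nat) : Int) := by
        push_cast
        ring
      rw [h2, pv_testBit_iff]
      constructor
      · intro hc h0
        exact hc (by exact_mod_cast h0)
      · intro hc h0
        exact hc (by exact_mod_cast h0)
    have hb : pvBuild sp (n+1) m.testBit
        = pvBuild sp n m.testBit ++ [if m.testBit n then PySem.List.pyGetD sp (n : Int) 0 else -1] := by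
      unfold pvBuild
      rw [List.range_succ, List.map_append]
      simp
    rw [hb, pvPcb_succ]
    by_cases ht : m.testBit n = true
    · rw [if_pos (hcond.mpr ht), ht]
      simp
    · have ht' : m.testBit n = false := by
        cases h : m.testBit n
        · rfl
        · exact absurd h ht
      rw [if_neg (fun hc => ht (hcond.mp hc)), ht']
      simp

lemma pvA_eq (sp : List Int) (spn wise f vi : Int) (up : List (List Int)) :
    calc_covered_ucp_num_for_next_value sp spn wise f vi up
    = (((List.range (2^sp.length)).countP
        (fun m => (decide ((pvPcb m sp.length : Int) = wise - 1)) && pvQ sp sp.length f vi up m.testBit) : Nat) : Int) := by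
  unfold calc_covered_ucp_num_for_next_value
  simp only []
  rw [show (2:Int) ^ ((sp.length : Int)).toNat = ((2 ^ sp.length : Nat) : Int) by
        rw [Int.toNat_natCast]; push_cast; ring]
  rw [PySem.List.pyRange_zero_nat (2 ^ sp.length), List.foldl_map]
  refine Eq.trans (PySem.List.foldl_congr_mem _ _
      (fun (total : Int) (m : Nat) =>
        if (decide ((pvPcb m sp.length : Int) = wise - 1)) && pvQ sp sp.length f vi up m.testBit
        then total + 1 else total) 0 ?_) ?_
  · intro total m _hm
    dsimp only
    rw [pvInnerA sp m sp.length]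
    dsimp only
    unfold pvQ
    by_cases h1 : ((pvPcb m sp.length : Nat) : Int) = wise - 1
    · by_cases h2 : PySem.List.pySetD (pvBuild sp sp.length m.testBit) f vi ∈ up
      · simp [h1, h2]
      · simp [h1, h2]
    · simp [h1]
  · rw [PySem.List.foldl_count_if, zero_add]

-- ===== B-side reduction =====

lemma pvSetMapRange (sp : List Int) (n j0 : Nat) (_h : j0 < n) (g : Nat → Bool) :
    PySem.List.pySetD (pvBuild sp n g) (j0 : Int) (PySem.List.pyGetD sp (j0 : Int) 0)
    = pvBuild sp n (fun j => g j || decide (j = j0)) := by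
  rw [PySem.List.pySetD_natCast]
  unfold pvBuild
  apply List.ext_getElem
  · simp
  · intro i hi1 hi2
    rw [List.getElem_set]
    simp only [List.getElem_map, List.getElem_range]
    by_cases hij : j0 = i
    · subst hij
      simp
    · have hji : ¬ (i = j0) := fun hh => hij hh.symm
      simp [hij, hji]

lemma pvFoldSet (sp : List Int) (n : Nat) :
    ∀ (S : List Nat), (∀ j ∈ S, j < n) → ∀ g : Nat → Bool,
    S.foldl (fun st (j : Nat) => PySem.List.pySetD st (j : Int) (PySem.List.pyGetD sp (j : Int) 0)) (pvBuild sp n g)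
    = pvBuild sp n (fun j => g j || decide (j ∈ S)) := by
  intro S
  induction S with
  | nil =>
    intro _ g
    rw [List.foldl_nil]
    congr 1
    funext j
    simp
  | cons x xs ih =>
    intro hlt g
    rw [List.foldl_cons]
    rw [pvSetMapRange sp n x (hlt x (by simp)) g]
    rw [ih (fun j hj => hlt j (by simp [hj]))]
    congr 1
    funext j
    by_cases h1 : j = x <;> by_cases h2 : j ∈ xs <;> simp [h1, h2]

lemma pvReplicate (sp : List Int) (n : Nat) :
    List.replicate n (-1 : Int) = pvBuild sp n (fun _ => false) := by
  unfold pvBuild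
  simp

lemma pvB_eq (sp : List Int) (spn wise f vi : Int) (up : List (List Int)) :
    calc_covered_ucp_num_for_next_value_alt sp spn wise f vi up
    = if wise - 1 < 0 ∨ (sp.length : Int) < wise - 1 then 0
      else (((pvCombos sp.length (wise - 1).toNat).countP
             (fun S => pvQ sp sp.length f vi up (fun j => decide (j ∈ S))) : Nat) : Int) := by
  unfold calc_covered_ucp_num_for_next_value_alt
  simp only []
  by_cases hg : wise - 1 < 0 ∨ (sp.length : Int) < wise - 1
  · rw [if_pos hg, if_pos hg]
  · rw [if_neg hg, if_neg hg]
    refine Eq.trans (PySem.List.foldl_congr_mem _ _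
        (fun (total : Int) (S : List Nat) =>
          if pvQ sp sp.length f vi up (fun j => decide (j ∈ S)) then total + 1 else total) 0 ?_) ?_
    · intro total S hS
      dsimp only
      rw [pvReplicate sp sp.length, pvFoldSet sp sp.length S (pvCombos_mem_lt _ _ S hS)]
      have hgg : (fun j => false || decide (j ∈ S)) = (fun j => decide (j ∈ S)) := by
        funext j
        simp
      rw [hgg]
      unfold pvQ
      by_cases h2 : PySem.List.pySetD (pvBuild sp sp.length (fun j => decide (j ∈ S))) f vi ∈ up
      · simp [h2]
      · simp [h2]
    · rw [PySem.List.foldl_count_if, zero_add]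

-- ===== VERDICT (by name: the statement is the Claim_ definition above) =====
theorem calc_covered_ucp_num_for_next_value_spec : Claim_equal_calc_covered_ucp_num_for_next_value := by
  unfold Claim_equal_calc_covered_ucp_num_for_next_value
  intro sp spn wise f vi up _hdom _hpre
  unfold Spec_calc_covered_ucp_num_for_next_value
  rw [pvA_eq, pvB_eq]
  by_cases hg : wise - 1 < 0 ∨ (sp.length : Int) < wise - 1
  · rw [if_pos hg]
    have hz : (List.range (2^sp.length)).countP
        (fun m => (decide ((pvPcb m sp.length : Int) = wise - 1)) && pvQ sp sp.length f vi up m.testBit) = 0 := by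
      apply List.countP_eq_zero.2
      intro m _hm
      have h1 : (0:Int) ≤ (pvPcb m sp.length : Int) := Int.natCast_nonneg _
      have h2 : (pvPcb m sp.length : Int) ≤ (sp.length : Int) := by
        exact_mod_cast pvPcb_le m sp.length
      have hne : ¬ ((pvPcb m sp.length : Int) = wise - 1) := by omega
      simp [hne]
    rw [hz]
    simp
  · rw [if_neg hg]
    have hk0 : (0:Int) ≤ wise - 1 := by omega
    have hkt : ((wise - 1).toNat : Int) = wise - 1 := Int.toNat_of_nonneg hk0
    have hpred : (List.range (2^sp.length)).countP
        (fun m => (decide ((pvPcb m sp.length : Int) = wise - 1)) && pvQ sp sp.length f vi up m.testBit)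
        = (List.range (2^sp.length)).countP
        (fun m => (pvPcb m sp.length == (wise - 1).toNat) && pvQ sp sp.length f vi up m.testBit) := by
      apply List.countP_congr
      intro m _hm
      have hd : (decide ((pvPcb m sp.length : Int) = wise - 1)) = (pvPcb m sp.length == (wise - 1).toNat) := by
        by_cases h : pvPcb m sp.length = (wise - 1).toNat
        · rw [h, hkt]
          simp
        · have hne : ¬ ((pvPcb m sp.length : Int) = wise - 1) := by
            intro hc
            apply h
            have hcast : ((pvPcb m sp.length : Nat) : Int) = ((wise - 1).toNat : Int) := by
              rw [hc, hkt]
            exact_mod_cast hcast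
          rw [decide_eq_false hne]
          have hb2 : (pvPcb m sp.length == (wise - 1).toNat) = false := by
            cases hb : (pvPcb m sp.length == (wise - 1).toNat)
            · rfl
            · exact absurd (eq_of_beq hb) h
          rw [hb2]
      rw [hd]
    rw [hpred, pvCount sp.length (wise - 1).toNat (pvQ sp sp.length f vi up)]
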